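-- pv_equiv track=rewrite | github.com/DojoFatecSP/Dojos | 2018/20180830 - enfeites - python/enfeites.py | solve
-- ===== SOURCE A (Python) =====
-- def solve(bolinhas):
--     caixinhas = {}
--     for bolinha in bolinhas:
--         caixinhas[bolinha[0]] = []
--
--     for bolinha in bolinhas:
--         caixinhas[bolinha[0]].append(bolinha[1])
--         #caixinhas[bolinha[0]].sort()
--
--     for caixinha, bolas in caixinhas.items():
--         bolas.sort(reverse=True)
--
--     chaves = sorted(list(caixinhas.keys()))
--
--     resultado = []
--
--     for caixa in chaves:
--         resultado = resultado + caixinhas[caixa]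
--
--
--     return resultado
-- ===== SOURCE B (Python) =====
-- def solve(bolinhas):
--     tmp = sorted(bolinhas, key=lambda b: b[1], reverse=True)
--     tmp = sorted(tmp, key=lambda b: b[0])
--     return [b[1] for b in tmp]
-- ===== Notes on version B (the rewrite author's own statement) =====
-- stated objective: idiomatic
-- what changed: Replaced the dict-grouping, per-bucket in-place sorts and repeated list concatenation with two stable sorts of the flat list (by value descending, then by key ascending) followed by a single projection.
import Mathlib
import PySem

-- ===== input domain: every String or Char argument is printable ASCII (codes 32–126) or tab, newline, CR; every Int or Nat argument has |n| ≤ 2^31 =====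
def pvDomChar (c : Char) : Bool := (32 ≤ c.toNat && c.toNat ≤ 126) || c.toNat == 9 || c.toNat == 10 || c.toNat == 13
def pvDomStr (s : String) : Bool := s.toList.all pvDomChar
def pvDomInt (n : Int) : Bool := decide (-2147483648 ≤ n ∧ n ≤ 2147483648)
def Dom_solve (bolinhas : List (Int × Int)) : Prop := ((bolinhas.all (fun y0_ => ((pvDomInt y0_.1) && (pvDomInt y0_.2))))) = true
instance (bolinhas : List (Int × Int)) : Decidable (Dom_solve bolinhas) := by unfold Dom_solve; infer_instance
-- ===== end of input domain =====

-- B replaces A's dict-grouping, per-bucket sorts and repeated concatenation with two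
-- stable sorts of the flat list and a single projection (idiomatic; same results).

-- ===== PORT A =====
-- A builds a dict key -> list of values (two passes), sorts each bucket descending
-- in place, then concatenates the buckets in ascending key order.
def solve (bolinhas : List (Int × Int)) : List Int :=
  let caixinhas0 : PySem.Dict Int (List Int) :=
    bolinhas.foldl (fun d b => d.insert b.1 []) PySem.Dict.empty
  let caixinhas : PySem.Dict Int (List Int) :=
    bolinhas.foldl (fun d b => d.modify b.1 [] (fun v => v ++ [b.2])) caixinhas0
  -- 'bolas.sort(reverse=True)' mutates every value in place:
  let caixinhas2 : PySem.Dict Int (List Int) :=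
    PySem.Dict.mk (caixinhas.items.map (fun p => (p.1, PySem.List.sorted p.2 (fun x => x) true)))
  let chaves := PySem.List.sorted caixinhas2.keys (fun x => x)
  chaves.foldl (fun acc k => acc ++ caixinhas2.getD k []) []

-- ===== PORT B =====
-- B: stable sort by value descending, then stable sort by key ascending, project values.
def solve_alt (bolinhas : List (Int × Int)) : List Int :=
  let tmp := PySem.List.sorted bolinhas (fun b => b.2) true
  let tmp2 := PySem.List.sorted tmp (fun b => b.1)
  tmp2.map (fun b => b.2)

-- ===== PRECONDITION & SPEC =====
def Spec_solve (bolinhas : List (Int × Int)) (out : List Int) : Prop := out = solve_alt bolinhas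
instance (bolinhas : List (Int × Int)) (out : List Int) : Decidable (Spec_solve bolinhas out) := by unfold Spec_solve; infer_instance

-- ===== CLAIM (what is proved, stated in full; the proofs are below) =====
def Claim_equal_solve : Prop := ∀ (bolinhas : List (Int × Int)), Dom_solve bolinhas → Spec_solve bolinhas (solve bolinhas)

-- ===== LEMMAS AND PROOFS =====

-- `insertBy` passes over a prefix it does not insert into.
theorem pv_insertBy_append {α : Type} (before : α → α → Bool) (x : α) (A B : List α)
    (hA : ∀ y ∈ A, before x y = false) :
    PySem.List.insertBy before x (A ++ B) = A ++ PySem.List.insertBy before x B := by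
  induction A with
  | nil => rfl
  | cons a A ih =>
    simp only [List.cons_append, PySem.List.insertBy, hA a (by simp)]
    simp [ih (fun y hy => hA y (by simp [hy]))]

-- `insertBy` puts x in front when it goes before everything.
theorem pv_insertBy_front {α : Type} (before : α → α → Bool) (x : α) (B : List α)
    (hB : ∀ y ∈ B, before x y = true) :
    PySem.List.insertBy before x B = x :: B := by
  cases B with
  | nil => rfl
  | cons b B => simp [PySem.List.insertBy, hB b (by simp)]

-- Projecting the sort key out of an insertion commutes with the insertion.
theorem pv_snd_insertBy (x : Int × Int) (ys : List (Int × Int)) :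
    (PySem.List.insertBy (fun a b => decide (b.2 < a.2)) x ys).map Prod.snd
      = PySem.List.insertBy (fun a b => decide (b < a)) x.2 (ys.map Prod.snd) := by
  induction ys with
  | nil => rfl
  | cons y ys ih =>
    by_cases h : y.2 < x.2 <;> simp [PySem.List.insertBy, h, ih]

theorem pv_snd_foldl_insertBy (l : List (Int × Int)) (acc : List (Int × Int)) :
    (l.foldl (fun acc x => PySem.List.insertBy (fun a b => decide (b.2 < a.2)) x acc) acc).map Prod.snd
      = (l.map Prod.snd).foldl (fun acc v => PySem.List.insertBy (fun a b => decide (b < a)) v acc) (acc.map Prod.snd) := by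
  induction l generalizing acc with
  | nil => rfl
  | cons x l ih => simp only [List.foldl_cons, List.map_cons, ih, pv_snd_insertBy]

-- Projecting values out of a value-keyed sort = sorting the projected values.
theorem pv_snd_sorted_rev (l : List (Int × Int)) :
    (PySem.List.sorted l (fun p => p.2) true).map Prod.snd
      = PySem.List.sorted (l.map Prod.snd) (fun x => x) true := by
  rw [PySem.List.sorted_rev_eq_foldl_insertBy, PySem.List.sorted_rev_eq_foldl_insertBy]
  exact pv_snd_foldl_insertBy l []

-- Filtering commutes with inserting into a descending-sorted list.
theorem pv_filter_insertBy (p : Int × Int → Bool) (x : Int × Int) (S : List (Int × Int))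
    (hS : S.Pairwise (fun a b => b.2 ≤ a.2)) :
    (PySem.List.insertBy (fun a b => decide (b.2 < a.2)) x S).filter p
      = if p x then PySem.List.insertBy (fun a b => decide (b.2 < a.2)) x (S.filter p)
        else S.filter p := by
  induction S with
  | nil =>
    simp only [PySem.List.insertBy, List.filter]
    cases hpx : p x <;> simp
  | cons y ys ih =>
    rw [List.pairwise_cons] at hS
    by_cases hc : y.2 < x.2
    · have hall : ∀ z ∈ (y :: ys).filter p, decide (z.2 < x.2) = true := by
        intro z hz
        have hz' := List.mem_filter.mp hz |>.1
        rcases List.mem_cons.mp hz' with h | h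
        · subst h; simpa using hc
        · have := hS.1 z h
          simp only [decide_eq_true_eq]; omega
      rw [pv_insertBy_front _ x ((y :: ys).filter p) hall]
      simp only [PySem.List.insertBy, decide_eq_true_eq, if_pos hc]
      cases hpx : p x <;> cases hpy : p y <;> simp [List.filter, hpx, hpy]
    · simp only [PySem.List.insertBy, decide_eq_true_eq, if_neg hc]
      have ihy := ih hS.2
      cases hpx : p x <;> cases hpy : p y <;>
        simp [List.filter, hpx, hpy, ihy, PySem.List.insertBy, hc]

theorem pv_sorted_rev_append_singleton (m : List (Int × Int)) (x : Int × Int) :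
    PySem.List.sorted (m ++ [x]) (fun p => p.2) true
      = PySem.List.insertBy (fun a b => decide (b.2 < a.2)) x (PySem.List.sorted m (fun p => p.2) true) := by
  rw [PySem.List.sorted_rev_eq_foldl_insertBy, PySem.List.sorted_rev_eq_foldl_insertBy,
    List.foldl_append]
  rfl

-- Filtering commutes with the whole descending sort (stability).
theorem pv_filter_sorted_rev (p : Int × Int → Bool) (l : List (Int × Int)) :
    (PySem.List.sorted l (fun q => q.2) true).filter p
      = PySem.List.sorted (l.filter p) (fun q => q.2) true := by
  induction l using List.reverseRecOn with
  | nil => rfl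
  | append_singleton l x ih =>
    rw [pv_sorted_rev_append_singleton,
      pv_filter_insertBy p x _ (PySem.List.sorted_pairwise_rev l (fun q => q.2)), ih,
      List.filter_append]
    cases hpx : p x
    · simp [List.filter, hpx]
    · simp only [List.filter, hpx, if_true]
      rw [pv_sorted_rev_append_singleton]

-- flatMap congruence on members.
theorem pv_flatMap_congr {α β : Type} (l : List α) (f g : α → List β)
    (h : ∀ a ∈ l, f a = g a) : l.flatMap f = l.flatMap g := by
  induction l with
  | nil => rfl
  | cons a l ih =>
    simp only [List.flatMap_cons, h a (by simp), ih (fun a ha => h a (by simp [ha]))]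

-- Splitting a strictly increasing list at a member.
theorem pv_strict_split {K : List Int} (hp : K.Pairwise (· < ·)) {k0 : Int} (h : k0 ∈ K) :
    ∃ K1 K2, K = K1 ++ k0 :: K2 ∧ (∀ y ∈ K1, y < k0) ∧ (∀ y ∈ K2, k0 < y) := by
  obtain ⟨K1, K2, rfl⟩ := List.append_of_mem h
  rw [List.pairwise_append] at hp
  refine ⟨K1, K2, rfl, ?_, ?_⟩
  · intro y hy; exact hp.2.2 y hy k0 (by simp)
  · intro y hy; exact (List.pairwise_cons.mp hp.2.1).1 y hy

-- Inserting a non-member into a strictly increasing list.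
theorem pv_insertBy_strict_split {K : List Int} (hp : K.Pairwise (· < ·)) {k0 : Int}
    (h : k0 ∉ K) :
    ∃ K1 K2, K = K1 ++ K2 ∧
      PySem.List.insertBy (fun a b => decide (a < b)) k0 K = K1 ++ k0 :: K2 ∧
      (∀ y ∈ K1, y < k0) ∧ (∀ y ∈ K2, k0 < y) := by
  induction K with
  | nil => exact ⟨[], [], rfl, rfl, by simp, by simp⟩
  | cons y ys ih =>
    rw [List.pairwise_cons] at hp
    by_cases hc : k0 < y
    · refine ⟨[], y :: ys, rfl, ?_, by simp, ?_⟩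
      · simp [PySem.List.insertBy, hc]
      · intro z hz
        rcases List.mem_cons.mp hz with h' | h'
        · omega
        · have := hp.1 z h'; omega
    · have hne : k0 ≠ y := fun h' => h (h' ▸ List.mem_cons_self ..)
      obtain ⟨K1, K2, hK, hins, h1, h2⟩ := ih hp.2 (fun h' => h (List.mem_cons_of_mem _ h'))
      refine ⟨y :: K1, K2, by simp [hK], ?_, ?_, h2⟩
      · simp [PySem.List.insertBy, hc, hins]
      · intro z hz
        rcases List.mem_cons.mp hz with h' | h'
        · subst h'; omega
        · exact h1 z h'

-- Set.add facts.
theorem pv_set_add_of_mem {s : PySem.Set Int} {x : Int} (h : x ∈ s) :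
    PySem.Set.add s x = s := by
  simp [PySem.Set.add, PySem.Set.contains, h]

theorem pv_set_add_of_not_mem {s : PySem.Set Int} {x : Int} (h : x ∉ s) :
    PySem.Set.add s x = s ++ [x] := by
  simp [PySem.Set.add, PySem.Set.contains, h]

theorem pv_ofList_append_singleton (a : List Int) (x : Int) :
    PySem.Set.ofList (a ++ [x]) = PySem.Set.add (PySem.Set.ofList a) x := by
  rw [PySem.Set.ofList_eq_foldl, PySem.Set.ofList_eq_foldl, List.foldl_append]
  rfl

theorem pv_sorted_id_append_singleton (m : List Int) (x : Int) :
    PySem.List.sorted (m ++ [x]) (fun k => k)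
      = PySem.List.insertBy (fun a b => decide (a < b)) x (PySem.List.sorted m (fun k => k)) := by
  rw [PySem.List.sorted_eq_foldl_insertBy, PySem.List.sorted_eq_foldl_insertBy,
    List.foldl_append]
  rfl

theorem pv_sorted_fst_append_singleton (m : List (Int × Int)) (x : Int × Int) :
    PySem.List.sorted (m ++ [x]) (fun p => p.1)
      = PySem.List.insertBy (fun a b => decide (a.1 < b.1)) x (PySem.List.sorted m (fun p => p.1)) := by
  rw [PySem.List.sorted_eq_foldl_insertBy, PySem.List.sorted_eq_foldl_insertBy,
    List.foldl_append]
  rfl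

theorem pv_mem_group {l : List (Int × Int)} {k : Int} {y : Int × Int}
    (h : y ∈ l.filter (fun p => p.1 == k)) : y.1 = k := by
  have := (List.mem_filter.mp h).2
  exact beq_iff_eq.mp this

theorem pv_set_update_of_forall_mem {s : PySem.Set Int} {xs : List Int}
    (h : ∀ x ∈ xs, x ∈ s) : PySem.Set.update s xs = s := by
  induction xs generalizing s with
  | nil => rfl
  | cons x xs ih =>
    show PySem.Set.update (PySem.Set.add s x) xs = s
    rw [pv_set_add_of_mem (h x (by simp))]
    exact ih (fun y hy => h y (by simp [hy]))

theorem pv_filter_singleton_ne {x : Int × Int} {k : Int} (h : x.1 ≠ k) :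
    [x].filter (fun p => p.1 == k) = [] := by
  simp [h]

theorem pv_filter_singleton_self (x : Int × Int) :
    [x].filter (fun p => p.1 == x.1) = [x] := by
  simp [List.filter]

-- THE STABILITY LEMMA: a stable key sort is the concatenation of the original
-- groups in ascending key order.
theorem pv_sorted_fst_eq_flatMap (l : List (Int × Int)) :
    PySem.List.sorted l (fun p => p.1)
      = (PySem.List.sorted (PySem.Set.ofList (l.map (fun p => p.1))) (fun k => k)).flatMap
          (fun k => l.filter (fun p => p.1 == k)) := by
  induction l using List.reverseRecOn with
  | nil => rfl
  | append_singleton l x ih =>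
    rw [pv_sorted_fst_append_singleton, ih, List.map_append,
      show List.map (fun p => (p : Int × Int).1) [x] = [x.1] from rfl,
      pv_ofList_append_singleton]
    have hKlt := PySem.List.sorted_ofList_pairwise_lt (l.map fun p => p.1)
    by_cases hmem : x.1 ∈ l.map (fun p => p.1)
    · rw [pv_set_add_of_mem ((PySem.Set.mem_ofList _ _).mpr hmem)]
      have hmemK : x.1 ∈ PySem.List.sorted (PySem.Set.ofList (l.map fun p => p.1)) (fun k => k) :=
        (PySem.List.mem_sorted _ _ _ _).mpr ((PySem.Set.mem_ofList _ _).mpr hmem)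
      obtain ⟨K1, K2, hsp, h1, h2⟩ := pv_strict_split hKlt hmemK
      rw [hsp, List.flatMap_append, List.flatMap_cons, List.flatMap_append, List.flatMap_cons]
      rw [pv_flatMap_congr K1 (fun k => (l ++ [x]).filter (fun p => p.1 == k)) (fun k => l.filter (fun p => p.1 == k))
        (fun k hk => by
          simp only [List.filter_append, pv_filter_singleton_ne (show x.1 ≠ k from by have := h1 k hk; omega),
            List.append_nil])]
      rw [pv_flatMap_congr K2 (fun k => (l ++ [x]).filter (fun p => p.1 == k)) (fun k => l.filter (fun p => p.1 == k))
        (fun k hk => by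
          simp only [List.filter_append, pv_filter_singleton_ne (show x.1 ≠ k from by have := h2 k hk; omega),
            List.append_nil])]
      rw [show (l ++ [x]).filter (fun p => p.1 == x.1)
          = l.filter (fun p => p.1 == x.1) ++ [x] from by
        rw [List.filter_append, pv_filter_singleton_self]]
      rw [← List.append_assoc]
      rw [pv_insertBy_append _ x _ _ (by
        intro y hy
        rcases List.mem_append.mp hy with hy | hy
        · obtain ⟨k, hk, hyk⟩ := List.mem_flatMap.mp hy
          have := pv_mem_group hyk
          have := h1 k hk
          simp only [decide_eq_false_iff_not]; omega
        · have := pv_mem_group hy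
          simp only [decide_eq_false_iff_not]; omega)]
      rw [pv_insertBy_front _ x _ (by
        intro y hy
        obtain ⟨k, hk, hyk⟩ := List.mem_flatMap.mp hy
        have := pv_mem_group hyk
        have := h2 k hk
        simp only [decide_eq_true_eq]; omega)]
      simp
    · rw [pv_set_add_of_not_mem ((fun h => hmem ((PySem.Set.mem_ofList _ _).mp h))),
        pv_sorted_id_append_singleton]
      have hmemK : x.1 ∉ PySem.List.sorted (PySem.Set.ofList (l.map fun p => p.1)) (fun k => k) :=
        fun h => hmem ((PySem.Set.mem_ofList _ _).mp ((PySem.List.mem_sorted _ _ _ _).mp h))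
      obtain ⟨K1, K2, hK, hins, h1, h2⟩ := pv_insertBy_strict_split hKlt hmemK
      rw [hins, hK, List.flatMap_append, List.flatMap_append, List.flatMap_cons]
      rw [pv_flatMap_congr K1 (fun k => (l ++ [x]).filter (fun p => p.1 == k)) (fun k => l.filter (fun p => p.1 == k))
        (fun k hk => by
          simp only [List.filter_append, pv_filter_singleton_ne (show x.1 ≠ k from by have := h1 k hk; omega),
            List.append_nil])]
      rw [pv_flatMap_congr K2 (fun k => (l ++ [x]).filter (fun p => p.1 == k)) (fun k => l.filter (fun p => p.1 == k))
        (fun k hk => by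
          simp only [List.filter_append, pv_filter_singleton_ne (show x.1 ≠ k from by have := h2 k hk; omega),
            List.append_nil])]
      rw [show (l ++ [x]).filter (fun p => p.1 == x.1) = [x] from by
        rw [List.filter_append, pv_filter_singleton_self,
          show l.filter (fun p => p.1 == x.1) = [] from List.filter_eq_nil_iff.mpr
            (fun p hp hbeq => hmem (by
              have : p.1 = x.1 := beq_iff_eq.mp hbeq
              exact this ▸ List.mem_map_of_mem hp)),
          List.nil_append]]
      rw [pv_insertBy_append _ x _ _ (by
        intro y hy
        obtain ⟨k, hk, hyk⟩ := List.mem_flatMap.mp hy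
        have := pv_mem_group hyk
        have := h1 k hk
        simp only [decide_eq_false_iff_not]; omega)]
      rw [pv_insertBy_front _ x _ (by
        intro y hy
        obtain ⟨k, hk, hyk⟩ := List.mem_flatMap.mp hy
        have := pv_mem_group hyk
        have := h2 k hk
        simp only [decide_eq_true_eq]; omega)]
      simp

-- Keys of a permutation sort equally.
theorem pv_sortedKeys_perm {l l' : List (Int × Int)} (h : l.Perm l') :
    PySem.List.sorted (PySem.Set.ofList (l.map (fun p => p.1))) (fun k => k)
      = PySem.List.sorted (PySem.Set.ofList (l'.map (fun p => p.1))) (fun k => k) := by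
  apply PySem.List.sorted_eq_sorted_of_perm _ _ _ (fun a b hab => hab)
  apply List.perm_of_nodup_nodup_toFinset_eq (PySem.Set.nodup_ofList _) (PySem.Set.nodup_ofList _)
  ext k
  simp [PySem.Set.mem_ofList, h.map (fun p => p.1) |>.mem_iff]

-- A-side helpers.
theorem pv_getD_foldl_insert_nil (l : List (Int × Int)) (d : PySem.Dict Int (List Int))
    (hd : ∀ k, d.getD k [] = []) (k : Int) :
    (l.foldl (fun d b => d.insert b.1 []) d).getD k [] = [] := by
  induction l generalizing d with
  | nil => exact hd k
  | cons b l ih =>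
    refine ih _ (fun k' => ?_)
    rw [PySem.Dict.getD_insert]
    split <;> simp [hd]

theorem pv_solve_eq_canon (l : List (Int × Int)) :
    solve l
      = (PySem.List.sorted (PySem.Set.ofList (l.map (fun p => p.1))) (fun k => k)).flatMap
          (fun k => PySem.List.sorted ((l.filter (fun p => p.1 == k)).map Prod.snd) (fun v => v) true) := by
  unfold solve
  -- the dict built by the first loop
  have hk1 : (l.foldl (fun d b => d.insert b.1 []) (PySem.Dict.empty : PySem.Dict Int (List Int))).keys
      = PySem.Set.ofList (l.map (fun p => p.1)) := by
    rw [PySem.Dict.keys_foldl_insert_key l (fun b => b.1) (fun _ _ => []) PySem.Dict.empty]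
    simp [PySem.Set.update, PySem.Set.ofList, PySem.Set.empty, PySem.Dict.keys_empty]
  have hnd1 : (l.foldl (fun d b => d.insert b.1 []) (PySem.Dict.empty : PySem.Dict Int (List Int))).keys.Nodup :=
    PySem.Dict.nodup_keys_foldl_insert_key l (fun b => b.1) (fun _ _ => []) _ PySem.Dict.nodup_keys_empty
  have hg1 : ∀ k, (l.foldl (fun d b => d.insert b.1 []) (PySem.Dict.empty : PySem.Dict Int (List Int))).getD k [] = [] :=
    pv_getD_foldl_insert_nil l _ (fun k => by simp [PySem.Dict.getD_empty])
  -- the dict after the append loop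
  set d1 := l.foldl (fun d b => d.insert b.1 []) (PySem.Dict.empty : PySem.Dict Int (List Int)) with hd1
  set d2 := l.foldl (fun d b => d.modify b.1 [] (fun v => v ++ [b.2])) d1 with hd2
  have hk2 : d2.keys = d1.keys := by
    rw [hd2, PySem.Dict.keys_foldl_modify_key l (fun b => b.1) [] (fun _ b v => v ++ [b.2]) d1]
    exact pv_set_update_of_forall_mem (fun k hk => by
      rw [hk1, PySem.Set.mem_ofList]; exact hk)
  have hnd2 : d2.keys.Nodup := by
    rw [hk2]; exact hnd1
  have hg2 : ∀ k, d2.getD k []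
      = (l.filter (fun p => p.1 == k)).map (fun x => x.2) := by
    intro k
    rw [hd2, PySem.Dict.getD_foldl_modify_append l d1 k, hg1, List.nil_append]
  -- the dict after sorting every bucket
  set d3 : PySem.Dict Int (List Int) :=
    PySem.Dict.mk (d2.items.map (fun p => (p.1, PySem.List.sorted p.2 (fun x => x) true))) with hd3
  have hk3 : d3.keys = d2.keys := by
    simp [hd3, PySem.Dict.keys, List.map_map, Function.comp]
  have hg3 : ∀ k ∈ d2.keys, d3.getD k [] = PySem.List.sorted (d2.getD k []) (fun x => x) true := by
    intro k hk
    refine PySem.Dict.getD_of_mem_items d3 ?_ (by rw [hk3]; exact hnd2) []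
    show (k, PySem.List.sorted (d2.getD k []) (fun x => x) true) ∈ d2.items.map _
    rw [PySem.Dict.items_eq_map_keys d2 hnd2 [], List.map_map]
    exact List.mem_map_of_mem hk
  rw [PySem.List.foldl_append_eq_flatMap, List.nil_append, hk3, hk2, hk1]
  apply pv_flatMap_congr
  intro k hk
  have hkmem : k ∈ d2.keys := by
    rw [hk2, hk1]
    exact (PySem.List.mem_sorted _ _ _ _).mp hk
  rw [hg3 k hkmem, hg2 k]

theorem pv_solve_alt_eq_canon (l : List (Int × Int)) :
    solve_alt l
      = (PySem.List.sorted (PySem.Set.ofList (l.map (fun p => p.1))) (fun k => k)).flatMap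
          (fun k => PySem.List.sorted ((l.filter (fun p => p.1 == k)).map Prod.snd) (fun v => v) true) := by
  show (PySem.List.sorted (PySem.List.sorted l (fun b => b.2) true) (fun b => b.1)).map (fun b => b.2)
      = _
  rw [pv_sorted_fst_eq_flatMap (PySem.List.sorted l (fun b => b.2) true), List.map_flatMap,
    pv_sortedKeys_perm (PySem.List.sorted_perm l (fun b => b.2) true)]
  apply pv_flatMap_congr
  intro k hk
  rw [pv_filter_sorted_rev (fun p => p.1 == k) l, pv_snd_sorted_rev]

-- ===== VERDICT (by name: the statement is the Claim_ definition above) =====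
theorem solve_spec : Claim_equal_solve := by
  intro bolinhas _
  unfold Spec_solve
  rw [pv_solve_eq_canon, pv_solve_alt_eq_canon]
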